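-- pv_equiv track=rewrite | github.com/ElchaabiMohamed/InferCode_SVM | NC-5690-python-files/program_3059.py | suiteAriGeo
-- ===== SOURCE A (Python) =====
-- def verifSuiteAriGeo(liste,a,b):
--   res=True
--   i=1
--   while i<len(liste):
--     if liste[i]!=a*liste[i-1]+b:
--       res=False
--     i+=1
--   return res
--
-- def suiteAriGeo(liste):
--   i=1
--   a=1
--   b=0
--   res=True
--   while i<len(liste):
--     if liste[i-1]==0:
--       i+=1
--     else:
--       if liste[i]!=liste[i-1]:
--         a=liste[i]//liste[i-1]
--         b=liste[i]-a*liste[i-1]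
--         res=verifSuiteAriGeo(liste,a,b)
--     i+=1
--   return res
-- ===== SOURCE B (Python) =====
-- def suiteAriGeo(liste):
--     # One pass to find the (a,b) of the last qualifying pair, then one verification pass.
--     i = 1
--     last = None
--     while i < len(liste):
--         if liste[i - 1] == 0:
--             i += 2
--         else:
--             if liste[i] != liste[i - 1]:
--                 a = liste[i] // liste[i - 1]
--                 last = (a, liste[i] - a * liste[i - 1])
--             i += 1
--     if last is None:
--         return True
--     a, b = last
--     return all(liste[j] == a * liste[j - 1] + b for j in range(1, len(liste)))
-- ===== Notes on version B (the rewrite author's own statement) =====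
-- stated objective: faster
-- what changed: Instead of re-running the full O(n) verification for every qualifying pair as the scan advances, B scans once to record the (a,b) of the last qualifying pair and then performs a single O(n) verification pass.
import Mathlib
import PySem

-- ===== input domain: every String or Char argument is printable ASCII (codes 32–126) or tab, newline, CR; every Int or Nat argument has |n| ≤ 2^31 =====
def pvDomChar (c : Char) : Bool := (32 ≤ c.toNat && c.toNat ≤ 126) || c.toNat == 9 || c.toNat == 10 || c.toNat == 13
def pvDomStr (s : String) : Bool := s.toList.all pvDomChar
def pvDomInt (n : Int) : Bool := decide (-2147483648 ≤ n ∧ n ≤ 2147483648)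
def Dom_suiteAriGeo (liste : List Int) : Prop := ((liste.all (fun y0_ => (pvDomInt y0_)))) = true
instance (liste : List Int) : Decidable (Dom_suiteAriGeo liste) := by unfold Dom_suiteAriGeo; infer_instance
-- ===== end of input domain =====

-- B replaces A's repeated O(n) verification call per qualifying pair by a single
-- verification of the last qualifying pair's (a,b): O(n) instead of O(n^2).

-- ===== PORT A =====
-- while-loop of verifSuiteAriGeo, carrying res
def verifLoopA (liste : List Int) (a b : Int) (i : Nat) (res : Bool) : Bool :=
  if _h : i < liste.length then
    verifLoopA liste a b (i + 1)
      (if liste.getD i 0 ≠ a * liste.getD (i - 1) 0 + b then false else res)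
  else res
termination_by liste.length - i

def verifSuiteAriGeo (liste : List Int) (a b : Int) : Bool :=
  verifLoopA liste a b 1 true

-- while-loop of suiteAriGeo, carrying i, a, b, res
def suiteAriGeoLoop (liste : List Int) (i : Nat) (a b : Int) (res : Bool) : Bool :=
  if _h : i < liste.length then
    if liste.getD (i - 1) 0 = 0 then
      suiteAriGeoLoop liste (i + 2) a b res
    else if liste.getD i 0 ≠ liste.getD (i - 1) 0 then
      let a' := PySem.Int.floordiv (liste.getD i 0) (liste.getD (i - 1) 0)
      let b' := liste.getD i 0 - a' * liste.getD (i - 1) 0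
      suiteAriGeoLoop liste (i + 1) a' b' (verifSuiteAriGeo liste a' b')
    else
      suiteAriGeoLoop liste (i + 1) a b res
  else res
termination_by liste.length - i

def suiteAriGeo (liste : List Int) : Bool :=
  suiteAriGeoLoop liste 1 1 0 true

-- ===== PORT B =====
-- one pass recording the (a,b) of the last qualifying pair
def findLastB (liste : List Int) (i : Nat) (last : Option (Int × Int)) : Option (Int × Int) :=
  if _h : i < liste.length then
    if liste.getD (i - 1) 0 = 0 then
      findLastB liste (i + 2) last
    else if liste.getD i 0 ≠ liste.getD (i - 1) 0 then
      let a := PySem.Int.floordiv (liste.getD i 0) (liste.getD (i - 1) 0)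
      findLastB liste (i + 1) (some (a, liste.getD i 0 - a * liste.getD (i - 1) 0))
    else
      findLastB liste (i + 1) last
  else last
termination_by liste.length - i

-- all(liste[j] == a*liste[j-1] + b for j in range(1, len(liste)))
def allCheckB (liste : List Int) (a b : Int) (j : Nat) : Bool :=
  if _h : j < liste.length then
    (liste.getD j 0 == a * liste.getD (j - 1) 0 + b) && allCheckB liste a b (j + 1)
  else true
termination_by liste.length - j

def suiteAriGeo_alt (liste : List Int) : Bool :=
  match findLastB liste 1 none with
  | none => true
  | some (a, b) => allCheckB liste a b 1

-- ===== PRECONDITION & SPEC =====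
def Spec_suiteAriGeo (liste : List Int) (out : Bool) : Prop := out = suiteAriGeo_alt liste
instance (liste : List Int) (out : Bool) : Decidable (Spec_suiteAriGeo liste out) := by unfold Spec_suiteAriGeo; infer_instance

-- ===== CLAIM (what is proved, stated in full; the proofs are below) =====
def Claim_equal_suiteAriGeo : Prop := ∀ (liste : List Int), Dom_suiteAriGeo liste → Spec_suiteAriGeo liste (suiteAriGeo liste)

-- ===== LEMMAS AND PROOFS =====

-- A's verification loop is res && (B's `all` check)
theorem verifLoopA_eq_allCheck (liste : List Int) (a b : Int) :
    ∀ n i res, liste.length - i ≤ n →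
      verifLoopA liste a b i res = (res && allCheckB liste a b i) := by
  intro n
  induction n with
  | zero =>
    intro i res h
    rw [verifLoopA, allCheckB]
    simp only [dif_neg (by omega : ¬ i < liste.length)]
    simp
  | succ n ih =>
    intro i res h
    rw [verifLoopA, allCheckB]
    by_cases hi : i < liste.length
    · simp only [dif_pos hi]
      rw [ih (i + 1) _ (by omega)]
      cases res <;> by_cases he : liste.getD i 0 = a * liste.getD (i - 1) 0 + b <;> simp <;> rfl
    · simp only [dif_neg hi]; simp

theorem verif_eq_allCheck (liste : List Int) (a b : Int) :
    verifSuiteAriGeo liste a b = allCheckB liste a b 1 := by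
  rw [verifSuiteAriGeo, verifLoopA_eq_allCheck liste a b (liste.length) 1 true (by omega)]
  simp

-- accumulator lemma: a later find overrides the carried one
theorem findLastB_acc (liste : List Int) :
    ∀ n i p, liste.length - i ≤ n →
      findLastB liste i (some p) =
        (match findLastB liste i none with
         | none => some p
         | some q => some q) := by
  intro n
  induction n with
  | zero =>
    intro i p h
    conv_lhs => rw [findLastB]
    conv_rhs => rw [findLastB]
    simp only [dif_neg (by omega : ¬ i < liste.length)]
  | succ n ih =>
    intro i p h
    conv_lhs => rw [findLastB]
    conv_rhs => rw [findLastB]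
    by_cases hi : i < liste.length
    · simp only [dif_pos hi]
      by_cases h0 : liste.getD (i - 1) 0 = 0
      · simp only [if_pos h0]; exact ih (i + 2) p (by omega)
      · simp only [if_neg h0]
        by_cases hne : liste.getD i 0 ≠ liste.getD (i - 1) 0
        · simp only [if_pos hne]
          rw [ih (i + 1) _ (by omega)]
          cases hfl : findLastB liste (i + 1) none <;> simp
        · simp only [if_neg hne]; exact ih (i + 1) p (by omega)
    · simp only [dif_neg hi]

-- loop invariant: A's loop returns res if no later qualifying pair exists, else the
-- verification of the last one (which is what B computes)
theorem loop_eq (liste : List Int) :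
    ∀ n i a b res, liste.length - i ≤ n →
      suiteAriGeoLoop liste i a b res =
        (match findLastB liste i none with
         | none => res
         | some (a', b') => allCheckB liste a' b' 1) := by
  intro n
  induction n with
  | zero =>
    intro i a b res h
    conv_lhs => rw [suiteAriGeoLoop]
    conv_rhs => rw [findLastB]
    simp only [dif_neg (by omega : ¬ i < liste.length)]
  | succ n ih =>
    intro i a b res h
    conv_lhs => rw [suiteAriGeoLoop]
    conv_rhs => rw [findLastB]
    by_cases hi : i < liste.length
    · simp only [dif_pos hi]
      by_cases h0 : liste.getD (i - 1) 0 = 0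
      · simp only [if_pos h0]; exact ih (i + 2) a b res (by omega)
      · simp only [if_neg h0]
        by_cases hne : liste.getD i 0 ≠ liste.getD (i - 1) 0
        · simp only [if_pos hne]
          rw [ih (i + 1) _ _ _ (by omega),
              findLastB_acc liste liste.length (i + 1) _ (by omega)]
          cases hfl : findLastB liste (i + 1) none with
          | none => simp [verif_eq_allCheck]
          | some q => cases q; simp
        · simp only [if_neg hne]; exact ih (i + 1) a b res (by omega)
    · simp only [dif_neg hi]

-- ===== VERDICT (by name: the statement is the Claim_ definition above) =====
theorem suiteAriGeo_spec : Claim_equal_suiteAriGeo := by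
  intro liste _
  unfold Spec_suiteAriGeo suiteAriGeo suiteAriGeo_alt
  rw [loop_eq liste liste.length 1 1 0 true (by omega)]
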